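-- pv_equiv track=rewrite | github.com/pypi-data/pypi-mirror-385 | packages/yawp/yawp-2.2.0-py3-none-any.whl/yawp/__main__.py | chapter_level
-- ===== SOURCE A (Python) =====
-- def chapter_level(prefix):
--     "level of a chapter prefix: '0.' -> 1, '0.0.' -> 2, …, else -> 0"
--     status = 0; level = 0
--     for char in prefix:
--         if status == 0:
--             if char.isdecimal():
--                 status = 1
--             else:
--                 return 0
--         else: # status == 1
--             if char.isdecimal():
--                 pass
--             elif char == '.':
--                 level += 1
--                 status = 0
--             else:
--                 return 0
--     return level if status == 0 else 0
-- ===== SOURCE B (Python) =====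
-- def chapter_level(prefix):
--     "level of a chapter prefix: '0.' -> 1, '0.0.' -> 2, ..., else -> 0"
--     groups = prefix.split('.')
--     if groups[-1] != '':
--         return 0
--     body = groups[:-1]
--     if all(g.isdecimal() for g in body):
--         return len(body)
--     return 0
-- ===== Notes on version B (the rewrite author's own statement) =====
-- stated objective: idiomatic
-- what changed: Replaces the char-by-char two-state machine with a split-on-dot-then-validate pass: require a trailing empty group and all preceding groups decimal, return their count.
import Mathlib
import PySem

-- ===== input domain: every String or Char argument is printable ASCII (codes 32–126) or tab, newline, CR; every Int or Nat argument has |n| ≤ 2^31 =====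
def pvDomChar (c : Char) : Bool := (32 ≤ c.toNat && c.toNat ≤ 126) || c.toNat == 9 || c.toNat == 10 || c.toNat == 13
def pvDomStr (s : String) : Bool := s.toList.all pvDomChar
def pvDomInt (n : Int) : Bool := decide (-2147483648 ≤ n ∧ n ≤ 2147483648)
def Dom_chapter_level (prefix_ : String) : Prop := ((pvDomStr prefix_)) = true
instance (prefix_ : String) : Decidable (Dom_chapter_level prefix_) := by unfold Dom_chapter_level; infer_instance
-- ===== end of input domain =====

-- B replaces A's char-by-char two-state machine by a split-on-dot-then-validate pass (idiomatic, same cost).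
-- On the ASCII domain, Python's char.isdecimal() is exactly PySem.Chars.isdigit ('0'..'9').

-- ===== PORT A =====
-- the for-loop with (status, level) state; an early 'return 0' becomes returning 0
def chALoop : List Char → Nat → Int → Int
  | [], status, level => if status = 0 then level else 0
  | c :: cs, status, level =>
    if status = 0 then
      if PySem.Chars.isdigit c then chALoop cs 1 level else 0
    else
      if PySem.Chars.isdigit c then chALoop cs 1 level
      else if c = '.' then chALoop cs 0 (level + 1)
      else 0

def chapter_level (prefix_ : String) : Int := chALoop prefix_.toList 0 0

-- ===== PORT B =====
-- prefix.split('.') ported by hand (exact here: Python's str.split with the one-char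
-- separator '.' splits at every occurrence, keeps empty pieces, and returns [''] for '')
def splitDot : List Char → List (List Char)
  | [] => [[]]
  | c :: cs =>
    match splitDot cs with
    | g :: gs => if c = '.' then [] :: g :: gs else (c :: g) :: gs
    | [] => []   -- unreachable: splitDot always returns a nonempty list

def chapter_level_alt (prefix_ : String) : Int :=
  let groups := splitDot prefix_.toList
  if groups.getLast? ≠ some [] then 0
  else
    let body := groups.dropLast
    if body.all PySem.Chars.strIsdigit then (body.length : Int) else 0

-- ===== PRECONDITION & SPEC =====
def Spec_chapter_level (prefix_ : String) (out : Int) : Prop := out = chapter_level_alt prefix_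
instance (prefix_ : String) (out : Int) : Decidable (Spec_chapter_level prefix_ out) := by unfold Spec_chapter_level; infer_instance

-- ===== CLAIM (what is proved, stated in full; the proofs are below) =====
def Claim_equal_chapter_level : Prop := ∀ (prefix_ : String), Dom_chapter_level prefix_ → Spec_chapter_level prefix_ (chapter_level prefix_)

-- ===== LEMMAS AND PROOFS =====

-- validity of a groups list as seen from status 0 (cond0) / status 1 (cond1)
def cond0 : List (List Char) → Bool
  | [] => false
  | [g] => g == []
  | g :: gs => PySem.Chars.strIsdigit g && cond0 gs

def cond1 : List (List Char) → Bool
  | [] => false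
  | g :: gs => g.all PySem.Chars.isdigit && cond0 gs

lemma splitDot_ne_nil (cs : List Char) : splitDot cs ≠ [] := by
  cases cs with
  | nil => simp [splitDot]
  | cons c cs =>
    rcases h : splitDot cs with _ | ⟨g, gs⟩
    · exact absurd h (splitDot_ne_nil cs)
    · simp only [splitDot, h]
      split <;> simp

-- cond0 (on a nonempty list) is exactly B's getLast?/dropLast test
lemma cond0_eq (g : List Char) (gs : List (List Char)) :
    cond0 (g :: gs) = (((g :: gs).getLast? == some []) && (g :: gs).dropLast.all PySem.Chars.strIsdigit) := by
  induction gs generalizing g with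
  | nil => simp [cond0]
  | cons g' gs' ih =>
    rw [show cond0 (g :: g' :: gs') = (PySem.Chars.strIsdigit g && cond0 (g' :: gs')) from rfl, ih g']
    simp only [List.getLast?_cons_cons, List.dropLast_cons₂, List.all_cons]
    cases h : PySem.Chars.strIsdigit g <;> simp

lemma chALoop_eq (cs : List Char) : ∀ l : Int,
    chALoop cs 0 l = (if cond0 (splitDot cs) then l + ((splitDot cs).length : Int) - 1 else 0)
    ∧ chALoop cs 1 l = (if cond1 (splitDot cs) then l + ((splitDot cs).length : Int) - 1 else 0) := by
  induction cs with
  | nil =>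
    intro l
    constructor <;> simp [chALoop, splitDot, cond0, cond1]
  | cons c cs ih =>
    intro l
    obtain ⟨g, gs, hsp⟩ : ∃ g gs, splitDot cs = g :: gs := by
      rcases h : splitDot cs with _ | ⟨g, gs⟩
      · exact absurd h (splitDot_ne_nil cs)
      · exact ⟨g, gs, rfl⟩
    constructor
    · -- from status 0
      by_cases hd : PySem.Chars.isdigit c
      · have hdot : ¬ c = '.' := by
          intro h; subst h; simp [PySem.Chars.isdigit] at hd
        have hsd : splitDot (c :: cs) = (c :: g) :: gs := by simp [splitDot, hsp, hdot]
        rw [show chALoop (c :: cs) 0 l = chALoop cs 1 l by simp [chALoop, hd],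
          (ih l).2, hsp, hsd]
        cases gs with
        | nil => simp [cond0, cond1]
        | cons g' gs' =>
          rw [show cond0 ((c :: g) :: g' :: gs') =
              (PySem.Chars.strIsdigit (c :: g) && cond0 (g' :: gs')) from rfl]
          simp [cond1, PySem.Chars.strIsdigit, hd]
      · rw [show chALoop (c :: cs) 0 l = 0 by simp [chALoop, hd]]
        by_cases hdot : c = '.'
        · subst hdot
          have hsd : splitDot ('.' :: cs) = [] :: g :: gs := by simp [splitDot, hsp]
          rw [hsd,
            show cond0 ([] :: g :: gs) = (PySem.Chars.strIsdigit [] && cond0 (g :: gs)) from rfl]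
          simp [PySem.Chars.strIsdigit]
        · have hsd : splitDot (c :: cs) = (c :: g) :: gs := by simp [splitDot, hsp, hdot]
          rw [hsd]
          cases gs with
          | nil => simp [cond0]
          | cons g' gs' =>
            rw [show cond0 ((c :: g) :: g' :: gs') =
                (PySem.Chars.strIsdigit (c :: g) && cond0 (g' :: gs')) from rfl]
            simp [PySem.Chars.strIsdigit, hd]
    · -- from status 1
      by_cases hd : PySem.Chars.isdigit c
      · have hdot : ¬ c = '.' := by
          intro h; subst h; simp [PySem.Chars.isdigit] at hd
        have hsd : splitDot (c :: cs) = (c :: g) :: gs := by simp [splitDot, hsp, hdot]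
        rw [show chALoop (c :: cs) 1 l = chALoop cs 1 l by simp [chALoop, hd],
          (ih l).2, hsp, hsd]
        simp [cond1, hd]
      · by_cases hdot : c = '.'
        · subst hdot
          have hsd : splitDot ('.' :: cs) = [] :: g :: gs := by simp [splitDot, hsp]
          rw [show chALoop ('.' :: cs) 1 l = chALoop cs 0 (l + 1) by simp [chALoop, hd],
            (ih (l + 1)).1, hsp, hsd]
          simp only [cond1, List.all_nil, Bool.true_and, List.length_cons]
          by_cases hc : cond0 (g :: gs) <;> simp [hc] <;> push_cast <;> ring
        · have hsd : splitDot (c :: cs) = (c :: g) :: gs := by simp [splitDot, hsp, hdot]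
          rw [show chALoop (c :: cs) 1 l = 0 by simp [chALoop, hd, hdot], hsd]
          simp [cond1, hd]

lemma alt_eq_cond0 (prefix_ : String) :
    chapter_level_alt prefix_ =
      (if cond0 (splitDot prefix_.toList) then ((splitDot prefix_.toList).length : Int) - 1 else 0) := by
  unfold chapter_level_alt
  rcases h : splitDot prefix_.toList with _ | ⟨g, gs⟩
  · exact absurd h (splitDot_ne_nil _)
  rw [cond0_eq]
  by_cases h1 : (g :: gs).getLast? = some []
  · by_cases h2 : (g :: gs).dropLast.all PySem.Chars.strIsdigit <;>
      simp [h1, h2, List.length_dropLast]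
  · simp [h1]

-- ===== VERDICT (by name: the statement is the Claim_ definition above) =====
theorem chapter_level_spec : Claim_equal_chapter_level := by
  intro prefix_ _
  unfold Spec_chapter_level chapter_level
  rw [(chALoop_eq prefix_.toList 0).1, alt_eq_cond0]
  split <;> ring
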